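-- pv_equiv track=rewrite | github.com/chunjiw/leetcode | codeforces/TheForces Round #44/c.py | firstFactor
-- ===== SOURCE A (Python) =====
-- import math
--
-- def firstFactor(n, l, r):
--     # factor n
--     can = []
--     for i in range(1, math.isqrt(n)+1):
--         if n % i == 0:
--             if l <= i <= r:
--                 return i
--             elif i > r:
--                 return -1
--             if i * i != n:
--                 can.append(n // i)
--     while can:
--         if l <= can[-1] <= r:
--             return can[-1]
--         can.pop()
--     return -1
-- ===== SOURCE B (Python) =====
-- import math
--
-- def firstFactor(n, l, r):
--     # one pass: collect every divisor of n that lies in [l, r], then take the minimum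
--     cands = []
--     for i in range(1, math.isqrt(n) + 1):
--         if n % i == 0:
--             if l <= i <= r:
--                 cands.append(i)
--             q = n // i
--             if l <= q <= r:
--                 cands.append(q)
--     return min(cands) if cands else -1
-- ===== Notes on version B (the rewrite author's own statement) =====
-- stated objective: simpler
-- what changed: A scans small divisors with two early-return branches and then re-scans a stack of stashed cofactors backwards; B does one collect pass adding every in-range divisor (i and n//i) to a list and returns min(list) or -1.
import Mathlib
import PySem

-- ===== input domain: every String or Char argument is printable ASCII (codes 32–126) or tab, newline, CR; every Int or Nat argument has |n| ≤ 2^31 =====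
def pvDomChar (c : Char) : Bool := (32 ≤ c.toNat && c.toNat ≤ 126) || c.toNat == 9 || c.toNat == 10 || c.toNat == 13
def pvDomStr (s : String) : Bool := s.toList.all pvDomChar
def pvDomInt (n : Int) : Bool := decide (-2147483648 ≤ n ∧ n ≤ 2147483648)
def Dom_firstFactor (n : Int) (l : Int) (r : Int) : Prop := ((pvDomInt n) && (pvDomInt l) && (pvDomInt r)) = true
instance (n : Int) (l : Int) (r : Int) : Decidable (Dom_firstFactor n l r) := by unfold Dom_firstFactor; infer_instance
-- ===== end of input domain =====

-- B replaces A's two differently-shaped passes (early-return scan + backwards while over stashed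
-- cofactors) by a single collect pass followed by min; same O(sqrt n) cost, simpler shape.

-- ===== PORT A =====
-- the `while can:` loop: check can[-1], pop from the end
def ffWhile (l r : Int) (can : List Int) : Int :=
  if h : can = [] then -1
  else
    let y := can.getLast h
    if l ≤ y ∧ y ≤ r then y else ffWhile l r can.dropLast
termination_by can.length
decreasing_by
  have : 0 < can.length := List.length_pos_iff.mpr h
  simp [List.length_dropLast]; omega

-- the `for i in range(1, isqrt(n)+1)` loop with its early returns, carrying `can`
def ffLoop (n l r : Int) : List Int → List Int → Int
  | [], can => ffWhile l r can
  | i :: rest, can =>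
    if PySem.Int.mod n i = 0 then
      if l ≤ i ∧ i ≤ r then i
      else if i > r then -1
      else ffLoop n l r rest (if i * i ≠ n then can ++ [PySem.Int.floordiv n i] else can)
    else ffLoop n l r rest can

-- math.isqrt(n) ported as Nat.sqrt on n.toNat: exact for n ≥ 0 (Pre_); Python raises ValueError for n < 0
def firstFactor (n : Int) (l : Int) (r : Int) : Int :=
  ffLoop n l r (PySem.List.pyRange 1 ((((Int.toNat n).sqrt : Int)) + 1) 1) []

-- ===== PORT B =====
-- loop body of Source B: append i if in range, then q = n//i if in range
def ffStep (n l r : Int) (acc : List Int) (i : Int) : List Int :=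
  if PySem.Int.mod n i = 0 then
    let acc1 := if l ≤ i ∧ i ≤ r then acc ++ [i] else acc
    let q := PySem.Int.floordiv n i
    if l ≤ q ∧ q ≤ r then acc1 ++ [q] else acc1
  else acc

def firstFactor_alt (n : Int) (l : Int) (r : Int) : Int :=
  let cands := (PySem.List.pyRange 1 ((((Int.toNat n).sqrt : Int)) + 1) 1).foldl (ffStep n l r) []
  match PySem.List.min? cands (fun x => x) with
  | some m => m
  | none => -1

-- ===== PRECONDITION & SPEC =====
-- Pre_ excludes n < 0, on which Python A raises ValueError in math.isqrt (B raises there too)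
def Pre_firstFactor (n : Int) (l : Int) (r : Int) : Prop := 0 ≤ n
instance (n : Int) (l : Int) (r : Int) : Decidable (Pre_firstFactor n l r) := by unfold Pre_firstFactor; infer_instance
def pvWitness_firstFactor : Int × Int × Int := (12, 3, 10)

def Spec_firstFactor (n : Int) (l : Int) (r : Int) (out : Int) : Prop := out = firstFactor_alt n l r
instance (n : Int) (l : Int) (r : Int) (out : Int) : Decidable (Spec_firstFactor n l r out) := by unfold Spec_firstFactor; infer_instance

-- ===== CLAIM (what is proved, stated in full; the proofs are below) =====
def Claim_equal_firstFactor : Prop := ∀ (n : Int) (l : Int) (r : Int), Dom_firstFactor n l r → Pre_firstFactor n l r → Spec_firstFactor n l r (firstFactor n l r)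

-- ===== LEMMAS AND PROOFS =====

-- B's finishing step: `min(cands) if cands else -1`
def bRes (cs : List Int) : Int :=
  match PySem.List.min? cs (fun x => x) with
  | some m => m
  | none => -1

-- the in-range test used throughout
def inR (l r x : Int) : Bool := decide (l ≤ x ∧ x ≤ r)

lemma firstFactor_alt_eq (n l r : Int) :
    firstFactor_alt n l r =
      bRes ((PySem.List.pyRange 1 ((((Int.toNat n).sqrt : Int)) + 1) 1).foldl (ffStep n l r) []) := rfl

lemma bRes_nil : bRes [] = -1 := rfl

lemma bRes_min (cs : List Int) (k : Int) (hk : k ∈ cs) (hmin : ∀ x ∈ cs, k ≤ x) :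
    bRes cs = k := by
  have hne : cs ≠ [] := by rintro rfl; simp at hk
  rcases h : PySem.List.min? cs (fun x => x) with _ | m
  · exact absurd ((PySem.List.min?_eq_none_iff cs (fun x => x)).mp h) hne
  · have hm := PySem.List.min?_mem h
    have h1 : k ≤ m := hmin m hm
    have h2 : m ≤ k := PySem.List.min?_isMin h k hk
    simp [bRes, h]; omega

lemma bRes_reverse (ys : List Int) : bRes ys.reverse = bRes ys := by
  rcases h : PySem.List.min? ys (fun x => x) with _ | m
  · have : ys = [] := (PySem.List.min?_eq_none_iff ys (fun x => x)).mp h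
    subst this; rfl
  · have hm := PySem.List.min?_mem h
    have hmin := PySem.List.min?_isMin h
    have : bRes ys = m := by simp [bRes, h]
    rw [this]
    exact bRes_min ys.reverse m (by simpa using hm) (by intro x hx; exact hmin x (by simpa using hx))

-- the while loop read from the back: scan the reversed list front-to-back
def rRes (l r : Int) : List Int → Int
  | [] => -1
  | y :: ys => if l ≤ y ∧ y ≤ r then y else rRes l r ys

lemma ffWhile_concat (l r : Int) (init : List Int) (y : Int) :
    ffWhile l r (init ++ [y]) = if l ≤ y ∧ y ≤ r then y else ffWhile l r init := by
  rw [ffWhile]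
  simp [List.getLast_concat, List.dropLast_concat]

lemma ffWhile_eq_rRes (l r : Int) (can : List Int) :
    ffWhile l r can = rRes l r can.reverse := by
  induction can using List.reverseRecOn with
  | nil => rw [ffWhile]; rfl
  | append_singleton init y ih =>
      rw [ffWhile_concat]
      simp [rRes, ih]

lemma rRes_eq_bRes (l r : Int) (zs : List Int) (h : zs.Pairwise (· ≤ ·)) :
    rRes l r zs = bRes (zs.filter (inR l r)) := by
  induction zs with
  | nil => rfl
  | cons z zs ih =>
      rcases List.pairwise_cons.mp h with ⟨hz, htail⟩
      by_cases hzr : l ≤ z ∧ z ≤ r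
      · have hf : (z :: zs).filter (inR l r) = z :: zs.filter (inR l r) := by
          simp [inR, hzr]
        rw [hf]
        simp only [rRes, if_pos hzr]
        refine (bRes_min _ z (by simp) ?_).symm
        intro x hx
        rcases List.mem_cons.mp hx with rfl | hx
        · omega
        · exact hz x (List.mem_of_mem_filter hx)
      · have hf : (z :: zs).filter (inR l r) = zs.filter (inR l r) := by
          simp [inR, hzr]
        rw [hf]
        simp only [rRes, if_neg hzr]
        exact ih htail

lemma ffWhile_eq_bRes (l r : Int) (can : List Int) (hpair : can.Pairwise (· > ·)) :
    ffWhile l r can = bRes (can.filter (inR l r)) := by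
  rw [ffWhile_eq_rRes]
  have hrev : can.reverse.Pairwise (· ≤ ·) := by
    rw [List.pairwise_reverse]
    exact hpair.imp (by intro a b h; omega)
  rw [rRes_eq_bRes l r _ hrev, List.filter_reverse, bRes_reverse]

-- membership after the fold: acc elements survive, new elements are in-range i or n//i for some i of the list
lemma mem_ffStep (n l r : Int) (acc : List Int) (i x : Int) (hx : x ∈ ffStep n l r acc i) :
    x ∈ acc ∨ (PySem.Int.mod n i = 0 ∧
      ((x = i ∧ l ≤ x ∧ x ≤ r) ∨ (x = PySem.Int.floordiv n i ∧ l ≤ x ∧ x ≤ r))) := by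
  by_cases hm : PySem.Int.mod n i = 0
  · by_cases h1 : l ≤ i ∧ i ≤ r
    · by_cases h2 : l ≤ PySem.Int.floordiv n i ∧ PySem.Int.floordiv n i ≤ r
      · have hx' : x ∈ acc ∨ x = i ∨ x = PySem.Int.floordiv n i := by
          simpa [ffStep, hm, h1, h2, List.mem_append, or_assoc] using hx
        rcases hx' with h | rfl | rfl
        · exact Or.inl h
        · exact Or.inr ⟨hm, Or.inl ⟨rfl, h1⟩⟩
        · exact Or.inr ⟨hm, Or.inr ⟨rfl, h2⟩⟩
      · have hx' : x ∈ acc ∨ x = i := by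
          simpa [ffStep, hm, h1, h2] using hx
        rcases hx' with h | rfl
        · exact Or.inl h
        · exact Or.inr ⟨hm, Or.inl ⟨rfl, h1⟩⟩
    · by_cases h2 : l ≤ PySem.Int.floordiv n i ∧ PySem.Int.floordiv n i ≤ r
      · have hx' : x ∈ acc ∨ x = PySem.Int.floordiv n i := by
          simpa [ffStep, hm, h1, h2] using hx
        rcases hx' with h | rfl
        · exact Or.inl h
        · exact Or.inr ⟨hm, Or.inr ⟨rfl, h2⟩⟩
      · left; simpa [ffStep, hm, h1, h2] using hx
  · left; simpa [ffStep, hm] using hx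

lemma mem_ffStep_of_mem (n l r : Int) (acc : List Int) (i x : Int) (hx : x ∈ acc) :
    x ∈ ffStep n l r acc i := by
  simp only [ffStep]
  split_ifs <;> simp [hx]

lemma mem_foldl_ffStep (n l r : Int) :
    ∀ (L acc : List Int) (x : Int), x ∈ L.foldl (ffStep n l r) acc →
      x ∈ acc ∨ ∃ j ∈ L, PySem.Int.mod n j = 0 ∧
        ((x = j ∧ l ≤ x ∧ x ≤ r) ∨ (x = PySem.Int.floordiv n j ∧ l ≤ x ∧ x ≤ r))
  | [], acc, x, hx => Or.inl hx
  | j :: L, acc, x, hx => by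
      rcases mem_foldl_ffStep n l r L (ffStep n l r acc j) x hx with h | ⟨j', hj', hrest⟩
      · rcases mem_ffStep n l r acc j x h with h' | h'
        · exact Or.inl h'
        · exact Or.inr ⟨j, by simp, h'⟩
      · exact Or.inr ⟨j', by simp [hj'], hrest⟩

lemma mem_foldl_ffStep_of_mem (n l r : Int) :
    ∀ (L acc : List Int) (x : Int), x ∈ acc → x ∈ L.foldl (ffStep n l r) acc
  | [], _, _, hx => hx
  | j :: L, acc, x, hx =>
      mem_foldl_ffStep_of_mem n l r L _ x (mem_ffStep_of_mem n l r acc j x hx)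

-- arithmetic facts about exact cofactors
lemma dvd_of_mod (n j : Int) (h : PySem.Int.mod n j = 0) : j ∣ n :=
  (PySem.Int.mod_eq_zero_iff_dvd n j).mp h

lemma floordiv_exact (n j : Int) (hj : 0 < j) (hdvd : j ∣ n) :
    j * PySem.Int.floordiv n j = n := by
  rw [PySem.Int.floordiv_eq_ediv_of_pos hj]
  exact Int.mul_ediv_cancel' hdvd

lemma ff_sq_le (k s n : Int) (hk : 0 ≤ k) (hks : k ≤ s) (hs : s * s ≤ n) : k * k ≤ n :=
  le_trans (mul_self_le_mul_self hk hks) hs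

lemma cof_lower (n j : Int) (hj : 0 < j) (hj2 : j * j ≤ n) (hdvd : j ∣ n) :
    j ≤ PySem.Int.floordiv n j := by
  have h := floordiv_exact n j hj hdvd
  nlinarith [h]

lemma cof_gt_s (n s j : Int) (hs : s * s ≤ n) (h1 : 0 < j) (hjs : j ≤ s)
    (hdvd : j ∣ n) (hne : j * j ≠ n) : s < PySem.Int.floordiv n j := by
  have h := floordiv_exact n j h1 hdvd
  set m := PySem.Int.floordiv n j with hm
  by_contra hle
  push_neg at hle
  have hjj : j * j < n := lt_of_le_of_ne (ff_sq_le j s n (by omega) hjs hs) hne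
  have hjm : j < m := by nlinarith
  have h1m : 0 < m := lt_trans h1 hjm
  nlinarith [mul_lt_mul_of_pos_right hjm h1m, mul_self_le_mul_self (le_of_lt h1m) hle]

-- the main invariant: processing the tail of the range starting at k, with A's `can` stack known to
-- hold pairwise-decreasing values above s that exceed n/k, A's remainder equals B's remainder
lemma main_loop (n l r s : Int) (hs0 : 0 ≤ s) (hsle : s * s ≤ n) :
    ∀ (t : Nat) (k : Int) (can : List Int),
      1 ≤ k → k + t = s + 1 →
      (∀ x ∈ can, s < x) →
      (∀ x ∈ can, n < x * k) →
      can.Pairwise (· > ·) →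
      ffLoop n l r (PySem.List.pyRange k (s + 1) 1) can =
        bRes ((PySem.List.pyRange k (s + 1) 1).foldl (ffStep n l r) (can.filter (inR l r))) := by
  intro t
  induction t with
  | zero =>
      intro k can hk hkt hgt hbig hpair
      have hk' : s + 1 ≤ k := by omega
      rw [PySem.List.pyRange_one_eq_nil hk']
      simpa [ffLoop, List.foldl] using ffWhile_eq_bRes l r can hpair
  | succ t ih =>
      intro k can hk hkt hgt hbig hpair
      have hks : k ≤ s := by omega
      have hklt : k < s + 1 := by omega
      rw [PySem.List.pyRange_one_cons hklt]
      simp only [ffLoop, List.foldl]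
      by_cases hmod : PySem.Int.mod n k = 0
      · have hdvd : k ∣ n := dvd_of_mod n k hmod
        have hq := floordiv_exact n k (by omega) hdvd
        set q := PySem.Int.floordiv n k with hqdef
        have hqk : k ≤ q := cof_lower n k (by omega) (ff_sq_le k s n (by omega) hks hsle) hdvd
        by_cases hinR : l ≤ k ∧ k ≤ r
        · -- A returns k early; B's final minimum is k
          rw [if_pos hmod, if_pos hinR]
          refine (bRes_min _ k ?_ ?_).symm
          · refine mem_foldl_ffStep_of_mem n l r _ _ k ?_
            simp only [ffStep, ← hqdef]
            rw [if_pos hmod]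
            by_cases h2 : l ≤ q ∧ q ≤ r <;> simp [hinR, h2]
          · intro x hx
            rcases mem_foldl_ffStep n l r _ _ x hx with hx' | ⟨j, hj, _, hcase⟩
            · rcases mem_ffStep n l r _ k x hx' with hx'' | ⟨_, hcase⟩
              · have := hgt x (List.mem_of_mem_filter hx'')
                omega
              · rcases hcase with ⟨rfl, _⟩ | ⟨rfl, _⟩
                · omega
                · omega
            · have hjmem := (PySem.List.mem_pyRange_one).mp hj
              rcases hcase with ⟨rfl, _⟩ | ⟨rfl, _⟩
              · omega
              · have : j ≤ PySem.Int.floordiv n j := by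
                  refine cof_lower n j (by omega) (ff_sq_le j s n (by omega) (by omega) hsle) ?_
                  exact dvd_of_mod n j (by assumption)
                omega
        · rw [if_pos hmod, if_neg hinR]
          by_cases hkr : k > r
          · -- A returns -1 early; nothing at or after k can be in range, B collects nothing
            rw [if_pos hkr]
            have hcanf : can.filter (inR l r) = [] := by
              rw [List.filter_eq_nil_iff]
              intro x hx
              have := hgt x hx
              simp [inR]; omega
            have hstep : ffStep n l r (can.filter (inR l r)) k = [] := by
              rw [hcanf]
              simp only [ffStep, ← hqdef]
              rw [if_pos hmod]
              have h1 : ¬ (l ≤ k ∧ k ≤ r) := hinR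
              have h2 : ¬ (l ≤ q ∧ q ≤ r) := by omega
              simp [h1, h2]
            rw [hstep]
            have hfin : (PySem.List.pyRange (k+1) (s+1) 1).foldl (ffStep n l r) [] = [] := by
              rw [List.eq_nil_iff_forall_not_mem]
              intro x hx
              rcases mem_foldl_ffStep n l r _ _ x hx with hx' | ⟨j, hj, hmj, hcase⟩
              · simp at hx'
              · have hjmem := (PySem.List.mem_pyRange_one).mp hj
                rcases hcase with ⟨rfl, _, _⟩ | ⟨rfl, _, _⟩
                · omega
                · have : j ≤ PySem.Int.floordiv n j := by
                    refine cof_lower n j (by omega) (ff_sq_le j s n (by omega) (by omega) hsle) ?_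
                    exact dvd_of_mod n j hmj
                  omega
            rw [hfin, bRes_nil]
          · -- A stashes the cofactor (unless k*k = n); B adds it iff in range: same state, recurse
            rw [if_neg hkr]
            have hkl : k < l := by omega
            have hstep : ffStep n l r (can.filter (inR l r)) k =
                (if k * k ≠ n then can ++ [q] else can).filter (inR l r) := by
              simp only [ffStep, ← hqdef]
              rw [if_pos hmod]
              by_cases hsq : k * k = n
              · have hqk' : q = k := by nlinarith
                have h1 : ¬ (l ≤ k ∧ k ≤ r) := hinR
                simp [hsq, hqk', h1]
              · have hqs : s < q := cof_gt_s n s k hsle (by omega) hks hdvd hsq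
                have h1 : ¬ (l ≤ k ∧ k ≤ r) := hinR
                by_cases h2 : l ≤ q ∧ q ≤ r
                · simp [hsq, h1, h2, inR, List.filter_append]
                · simp [hsq, h1, h2, inR, List.filter_append]
            rw [hstep]
            set can' := if k * k ≠ n then can ++ [q] else can with hcan'
            have hgt' : ∀ x ∈ can', s < x := by
              intro x hx
              rw [hcan'] at hx
              split_ifs at hx with hsq
              · rcases List.mem_append.mp hx with h | h
                · exact hgt x h
                · simp at h; subst h; exact cof_gt_s n s k hsle (by omega) hks hdvd hsq
              · exact hgt x hx
            have hbig' : ∀ x ∈ can', n < x * (k + 1) := by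
              intro x hx
              rw [hcan'] at hx
              have hxq : x ∈ can ∨ x = q := by
                split_ifs at hx with hsq
                · rcases List.mem_append.mp hx with h | h
                  · exact Or.inl h
                  · simp at h; exact Or.inr h
                · exact Or.inl hx
              rcases hxq with h | rfl
              · have h1 := hbig x h
                have h2 := hgt x h
                nlinarith
              · nlinarith
            have hpair' : can'.Pairwise (· > ·) := by
              rw [hcan']
              split_ifs with hsq
              · rw [List.pairwise_append]
                refine ⟨hpair, by simp, ?_⟩
                intro x hx y hy
                simp at hy; subst hy
                have := hbig x hx
                nlinarith
              · exact hpair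
            exact ih (k + 1) can' (by omega) (by omega) hgt' hbig' hpair'
      · rw [if_neg hmod]
        have hstep : ffStep n l r (can.filter (inR l r)) k = can.filter (inR l r) := by
          unfold ffStep; rw [if_neg hmod]
        rw [hstep]
        have hbig' : ∀ x ∈ can, n < x * (k + 1) := by
          intro x hx
          have h1 := hbig x hx
          have h2 := hgt x hx
          nlinarith
        exact ih (k + 1) can (by omega) (by omega) hgt hbig' hpair

-- ===== VERDICT (by name: the statement is the Claim_ definition above) =====
theorem firstFactor_spec : Claim_equal_firstFactor := by
  intro n l r _ hpre
  unfold Spec_firstFactor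
  have hn : 0 ≤ n := hpre
  set s : Int := ((Int.toNat n).sqrt : Int) with hs
  have hs0 : 0 ≤ s := by positivity
  have hsle : s * s ≤ n := by
    have h : Nat.sqrt (Int.toNat n) * Nat.sqrt (Int.toNat n) ≤ Int.toNat n := by
      have := Nat.sqrt_le' (Int.toNat n)
      nlinarith [this]
    have : ((Nat.sqrt (Int.toNat n) * Nat.sqrt (Int.toNat n) : Nat) : Int) ≤ ((Int.toNat n : Nat) : Int) := by
      exact_mod_cast h
    push_cast at this
    rwa [Int.toNat_of_nonneg hn] at this
  have hmain := main_loop n l r s hs0 hsle s.toNat 1 [] (by omega) (by omega)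
    (by intro x hx; simp at hx) (by intro x hx; simp at hx) (by simp)
  rw [firstFactor_alt_eq]
  unfold firstFactor
  simpa using hmain
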